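-- pv_equiv track=rewrite | github.com/mahmood726-cyber/qualsynth | qualsynth/graph_kernels.py | _common_walks
-- ===== SOURCE A (Python) =====
-- def _common_walks(nodes_a, adj_a, nodes_b, adj_b, length):
--     """Count common walks of given length between two graphs.
--
--     Uses direct product graph approach:
--     Nodes of product: (a, b) for a in A, b in B
--     Edge ((a1,b1), (a2,b2)) if (a1,a2) in A and (b1,b2) in B
--     Common walks = number of walks of given length in product graph.
--     """
--     if not nodes_a or not nodes_b:
--         return 0
--
--     # Product graph nodes
--     prod_nodes = []
--     for a in nodes_a:
--         for b in nodes_b: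
--             prod_nodes.append((a, b))
--
--     if not prod_nodes:
--         return 0
--
--     if length == 0:
--         return len(prod_nodes)
--
--     n = len(prod_nodes)
--     idx = {node: i for i, node in enumerate(prod_nodes)}
--
--     # Product adjacency
--     A = [[0] * n for _ in range(n)]
--     for i, (a1, b1) in enumerate(prod_nodes):
--         for j, (a2, b2) in enumerate(prod_nodes):
--             if i != j and (a1, a2) in adj_a and (b1, b2) in adj_b:
--                 A[i][j] = 1
--
--     # Compute A^length
--     result = [row[:] for row in A]
--     for _ in range(length - 1):
--         new_mat = [[0] * n for _ in range(n)]
--         for i in range(n):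
--             for j in range(n):
--                 s = 0
--                 for k in range(n):
--                     s += result[i][k] * A[k][j]
--                 new_mat[i][j] = s
--         result = new_mat
--
--     return sum(result[i][j] for i in range(n) for j in range(n))
-- ===== SOURCE B (Python) =====
-- def _common_walks(nodes_a, adj_a, nodes_b, adj_b, length):
--     """Count common walks via the product graph, but never form n x n matrices:
--     the answer is ones^T A^length ones, computed with `length` vector-matrix
--     products (O(length * n^2) instead of O(length * n^3))."""
--     if not nodes_a or not nodes_b:
--         return 0
--     prod = [(a, b) for a in nodes_a for b in nodes_b]
--     n = len(prod)
--     if length == 0: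
--         return n
--     ea = set(adj_a)
--     eb = set(adj_b)
--
--     def edge(i, j):
--         return i != j and (prod[i][0], prod[j][0]) in ea and (prod[i][1], prod[j][1]) in eb
--
--     def step(v):
--         # row-vector times product-adjacency: (v A)[j] = sum_t v[t] * A[t][j]
--         return [sum(v[t] for t in range(n) if edge(t, j)) for j in range(n)]
--
--     v = step([1] * n)
--     for _ in range(length - 1):
--         v = step(v)
--     return sum(v)
-- ===== Notes on version B (the rewrite author's own statement) =====
-- stated objective: faster
-- what changed: B never materialises the n x n product-adjacency matrix or its powers: it computes ones^T A^length ones by repeated row-vector-times-matrix products with set-based edge tests, instead of A's repeated full matrix-matrix multiplication.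
import Mathlib
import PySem

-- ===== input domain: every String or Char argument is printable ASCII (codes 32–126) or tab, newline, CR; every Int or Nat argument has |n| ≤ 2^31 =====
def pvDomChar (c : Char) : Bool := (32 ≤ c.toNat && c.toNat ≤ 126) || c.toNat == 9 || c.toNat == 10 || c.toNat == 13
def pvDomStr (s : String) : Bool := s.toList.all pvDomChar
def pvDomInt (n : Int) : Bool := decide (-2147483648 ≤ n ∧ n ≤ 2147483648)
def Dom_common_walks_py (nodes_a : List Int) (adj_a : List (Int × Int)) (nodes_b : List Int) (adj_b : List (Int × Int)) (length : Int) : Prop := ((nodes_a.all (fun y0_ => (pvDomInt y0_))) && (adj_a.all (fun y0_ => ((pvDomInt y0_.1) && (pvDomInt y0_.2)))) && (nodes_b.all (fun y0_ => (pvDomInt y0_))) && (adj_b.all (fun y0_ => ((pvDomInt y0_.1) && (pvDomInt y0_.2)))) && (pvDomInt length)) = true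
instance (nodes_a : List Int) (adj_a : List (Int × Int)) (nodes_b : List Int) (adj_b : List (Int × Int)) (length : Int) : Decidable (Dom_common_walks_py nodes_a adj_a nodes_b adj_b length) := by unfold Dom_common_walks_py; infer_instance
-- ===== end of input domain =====

-- B computes ones^T * A^length * ones of the product graph by repeated vector-matrix
-- products instead of A's repeated matrix-matrix products (objective: faster).

-- ===== PORT A =====
-- A's inline loops, as named helpers: product-node list, product-adjacency matrix, matrix product
def pvProd (nodes_a nodes_b : List Int) : List (Int × Int) :=
  nodes_a.flatMap (fun a => nodes_b.map (fun b => (a, b)))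

def pvMatA (P : List (Int × Int)) (adj_a adj_b : List (Int × Int)) (n : Nat) : List (List Int) :=
  (List.range n).map (fun i => (List.range n).map (fun j =>
    if i ≠ j ∧ (P[i]!.1, P[j]!.1) ∈ adj_a ∧ (P[i]!.2, P[j]!.2) ∈ adj_b then 1 else 0))

def pvMatMul (n : Nat) (res A0 : List (List Int)) : List (List Int) :=
  (List.range n).map (fun i => (List.range n).map (fun j =>
    (List.range n).foldl (fun s k => s + (res[i]!)[k]! * (A0[k]!)[j]!) 0))

def common_walks_py (nodes_a : List Int) (adj_a : List (Int × Int)) (nodes_b : List Int) (adj_b : List (Int × Int)) (length : Int) : Int :=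
  if nodes_a = [] ∨ nodes_b = [] then 0
  else
    let prod_nodes := pvProd nodes_a nodes_b
    if prod_nodes = [] then 0
    else if length = 0 then (prod_nodes.length : Int)
    else
      let n := prod_nodes.length
      -- (A's `idx` dict is built but never read; nothing depends on it)
      let A0 := pvMatA prod_nodes adj_a adj_b n
      let result := (List.range (length - 1).toNat).foldl (fun res _ => pvMatMul n res A0) A0
      ((List.range n).flatMap (fun i => (List.range n).map (fun j => (result[i]!)[j]!))).sum

-- ===== PORT B =====
-- Source B's inner helpers `edge` and `step` (one vector-matrix product)
def pvEdge (P : List (Int × Int)) (ea eb : PySem.Set (Int × Int)) (i j : Nat) : Bool :=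
  i != j && PySem.Set.contains ea (P[i]!.1, P[j]!.1) && PySem.Set.contains eb (P[i]!.2, P[j]!.2)

def pvStep (P : List (Int × Int)) (ea eb : PySem.Set (Int × Int)) (n : Nat) (v : List Int) : List Int :=
  (List.range n).map (fun j =>
    (List.range n).foldl (fun s t => if pvEdge P ea eb t j then s + v[t]! else s) 0)

def common_walks_py_alt (nodes_a : List Int) (adj_a : List (Int × Int)) (nodes_b : List Int) (adj_b : List (Int × Int)) (length : Int) : Int :=
  if nodes_a = [] ∨ nodes_b = [] then 0
  else
    let prod := pvProd nodes_a nodes_b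
    let n := prod.length
    if length = 0 then (n : Int)
    else
      let ea := PySem.Set.ofList adj_a
      let eb := PySem.Set.ofList adj_b
      let vfin := (List.range (length - 1).toNat).foldl (fun v _ => pvStep prod ea eb n v)
        (pvStep prod ea eb n (List.replicate n 1))
      vfin.sum

-- ===== PRECONDITION & SPEC =====
def Spec_common_walks_py (nodes_a : List Int) (adj_a : List (Int × Int)) (nodes_b : List Int) (adj_b : List (Int × Int)) (length : Int) (out : Int) : Prop := out = common_walks_py_alt nodes_a adj_a nodes_b adj_b length
instance (nodes_a : List Int) (adj_a : List (Int × Int)) (nodes_b : List Int) (adj_b : List (Int × Int)) (length : Int) (out : Int) : Decidable (Spec_common_walks_py nodes_a adj_a nodes_b adj_b length out) := by unfold Spec_common_walks_py; infer_instance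

-- ===== CLAIM (what is proved, stated in full; the proofs are below) =====
def Claim_equal_common_walks_py : Prop := ∀ (nodes_a : List Int) (adj_a : List (Int × Int)) (nodes_b : List Int) (adj_b : List (Int × Int)) (length : Int), Dom_common_walks_py nodes_a adj_a nodes_b adj_b length → Spec_common_walks_py nodes_a adj_a nodes_b adj_b length (common_walks_py nodes_a adj_a nodes_b adj_b length)

-- ===== LEMMAS AND PROOFS =====

-- column sum of the first n rows of a row-major matrix
def pvColSum (n : Nat) (R : List (List Int)) (k : Nat) : Int :=
  ∑ i ∈ Finset.range n, (R[i]!)[k]!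

theorem pvGetElemBang_map_range {α : Type} [Inhabited α] (f : Nat → α) {n i : Nat} (h : i < n) :
    ((List.range n).map f)[i]! = f i := by
  rw [getElem!_pos ((List.range n).map f) i (by simpa using h)]
  simp

theorem pvSum_map_range (f : Nat → Int) (n : Nat) :
    ((List.range n).map f).sum = ∑ k ∈ Finset.range n, f k := rfl

theorem pvSum_flatMap (l : List Nat) (f : Nat → List Int) :
    (l.flatMap f).sum = (l.map (fun a => (f a).sum)).sum := by
  induction l with
  | nil => rfl
  | cons x xs ih => simp [List.flatMap_cons, List.sum_append, ih]

-- the 0/1 matrix entry of A equals B's boolean edge test, weighted by v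
theorem pvEntry_eq (P : List (Int × Int)) (adj_a adj_b : List (Int × Int)) (n : Nat)
    (k j : Nat) (hk : k < n) (hj : j < n) (x : Int) :
    x * ((pvMatA P adj_a adj_b n)[k]!)[j]!
      = if pvEdge P (PySem.Set.ofList adj_a) (PySem.Set.ofList adj_b) k j then x else 0 := by
  unfold pvMatA pvEdge
  rw [pvGetElemBang_map_range _ hk, pvGetElemBang_map_range _ hj]
  have hb : (k != j && PySem.Set.contains (PySem.Set.ofList adj_a) (P[k]!.1, P[j]!.1)
      && PySem.Set.contains (PySem.Set.ofList adj_b) (P[k]!.2, P[j]!.2)) = true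
      ↔ (k ≠ j ∧ (P[k]!.1, P[j]!.1) ∈ adj_a ∧ (P[k]!.2, P[j]!.2) ∈ adj_b) := by
    simp only [Bool.and_eq_true, bne_iff_ne, PySem.Set.contains_iff, PySem.Set.mem_ofList,
      and_assoc]
  by_cases h : k ≠ j ∧ (P[k]!.1, P[j]!.1) ∈ adj_a ∧ (P[k]!.2, P[j]!.2) ∈ adj_b
  · rw [if_pos h, if_pos (hb.mpr h), mul_one]
  · rw [if_neg h, if_neg (fun hc => h (hb.mp hc)), mul_zero]

-- B's foldl step computes the weighted edge sum
theorem pvStep_getElem (P : List (Int × Int)) (ea eb : PySem.Set (Int × Int)) (n : Nat)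
    (v : List Int) (j : Nat) (hj : j < n) :
    (pvStep P ea eb n v)[j]!
      = ∑ t ∈ Finset.range n, (if pvEdge P ea eb t j then v[t]! else 0) := by
  unfold pvStep
  rw [pvGetElemBang_map_range _ hj]
  have hfun : (fun (s : Int) (t : Nat) => if pvEdge P ea eb t j then s + v[t]! else s)
      = (fun s t => s + (if pvEdge P ea eb t j then v[t]! else 0)) := by
    funext s t; split <;> simp
  rw [hfun, PySem.List.foldl_add, zero_add, pvSum_map_range]

-- one iteration: column sums of A's matrix product = B's next vector
theorem pvColSum_step (P : List (Int × Int)) (adj_a adj_b : List (Int × Int)) (n : Nat)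
    (R : List (List Int)) (v : List Int)
    (hIH : ∀ k, k < n → pvColSum n R k = v[k]!) (j : Nat) (hj : j < n) :
    pvColSum n (pvMatMul n R (pvMatA P adj_a adj_b n)) j
      = (pvStep P (PySem.Set.ofList adj_a) (PySem.Set.ofList adj_b) n v)[j]! := by
  rw [pvStep_getElem _ _ _ _ _ _ hj]
  unfold pvColSum pvMatMul
  have hrow : ∀ i ∈ Finset.range n,
      (((List.range n).map (fun i => (List.range n).map (fun j =>
        (List.range n).foldl (fun s k => s + (R[i]!)[k]! * ((pvMatA P adj_a adj_b n)[k]!)[j]!) 0)))[i]!)[j]!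
      = ∑ k ∈ Finset.range n, (R[i]!)[k]! * ((pvMatA P adj_a adj_b n)[k]!)[j]! := by
    intro i hi
    rw [pvGetElemBang_map_range _ (Finset.mem_range.mp hi), pvGetElemBang_map_range _ hj,
      PySem.List.foldl_add, zero_add, pvSum_map_range]
  rw [Finset.sum_congr rfl hrow, Finset.sum_comm]
  refine Finset.sum_congr rfl (fun k hk => ?_)
  have hk' := Finset.mem_range.mp hk
  rw [← Finset.sum_mul]
  have : (∑ i ∈ Finset.range n, (R[i]!)[k]!) = v[k]! := hIH k hk'
  rw [this, pvEntry_eq P adj_a adj_b n k j hk' hj]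

-- the loop invariant: after m iterations, B's vector is the column-sum vector of A's matrix
theorem pvInvariant (P : List (Int × Int)) (adj_a adj_b : List (Int × Int)) (n : Nat) (m : Nat) :
    (∀ k, k < n → pvColSum n
        ((List.range m).foldl (fun res _ => pvMatMul n res (pvMatA P adj_a adj_b n)) (pvMatA P adj_a adj_b n)) k
      = ((List.range m).foldl (fun v _ => pvStep P (PySem.Set.ofList adj_a) (PySem.Set.ofList adj_b) n v)
          (pvStep P (PySem.Set.ofList adj_a) (PySem.Set.ofList adj_b) n (List.replicate n 1)))[k]!)
    ∧ ∃ g, ((List.range m).foldl (fun v _ => pvStep P (PySem.Set.ofList adj_a) (PySem.Set.ofList adj_b) n v)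
          (pvStep P (PySem.Set.ofList adj_a) (PySem.Set.ofList adj_b) n (List.replicate n 1)))
        = (List.range n).map g := by
  induction m with
  | zero =>
    simp only [List.range_zero, List.foldl_nil]
    constructor
    · intro k hk
      rw [pvStep_getElem _ _ _ _ _ _ hk]
      unfold pvColSum
      refine Finset.sum_congr rfl (fun i hi => ?_)
      have hi' := Finset.mem_range.mp hi
      have hrepl : (List.replicate n (1 : Int))[i]! = 1 := by
        rw [getElem!_pos (List.replicate n (1 : Int)) i (by simpa using hi')]
        simp
      calc ((pvMatA P adj_a adj_b n)[i]!)[k]!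
          = 1 * ((pvMatA P adj_a adj_b n)[i]!)[k]! := (one_mul _).symm
        _ = if pvEdge P (PySem.Set.ofList adj_a) (PySem.Set.ofList adj_b) i k then 1 else 0 :=
            pvEntry_eq P adj_a adj_b n i k hi' hk 1
        _ = if pvEdge P (PySem.Set.ofList adj_a) (PySem.Set.ofList adj_b) i k
              then (List.replicate n (1 : Int))[i]! else 0 := by rw [hrepl]
    · exact ⟨_, rfl⟩
  | succ m ih =>
    rw [List.range_succ, List.foldl_append, List.foldl_append, List.foldl_cons, List.foldl_nil,
      List.foldl_cons, List.foldl_nil]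
    constructor
    · intro k hk
      exact pvColSum_step P adj_a adj_b n _ _ ih.1 k hk
    · exact ⟨_, rfl⟩

theorem pvProd_ne_nil {nodes_a nodes_b : List Int} (ha : nodes_a ≠ []) (hb : nodes_b ≠ []) :
    pvProd nodes_a nodes_b ≠ [] := by
  obtain ⟨a, ta, rfl⟩ := List.exists_cons_of_ne_nil ha
  obtain ⟨b, tb, rfl⟩ := List.exists_cons_of_ne_nil hb
  simp [pvProd]

-- ===== VERDICT (by name: the statement is the Claim_ definition above) =====
theorem common_walks_py_spec : Claim_equal_common_walks_py := by
  intro nodes_a adj_a nodes_b adj_b length _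
  unfold Spec_common_walks_py common_walks_py common_walks_py_alt
  by_cases h0 : nodes_a = [] ∨ nodes_b = []
  · simp [h0]
  · have ha : nodes_a ≠ [] := fun h => h0 (Or.inl h)
    have hb : nodes_b ≠ [] := fun h => h0 (Or.inr h)
    rw [if_neg h0, if_neg h0]
    simp only
    rw [if_neg (pvProd_ne_nil ha hb)]
    by_cases hl : length = 0
    · rw [if_pos hl, if_pos hl]
    · rw [if_neg hl, if_neg hl]
      set P := pvProd nodes_a nodes_b with hP
      set n := P.length with hn
      obtain ⟨hinv, g, hg⟩ := pvInvariant P adj_a adj_b n (length - 1).toNat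
      set R := (List.range (length - 1).toNat).foldl
        (fun res _ => pvMatMul n res (pvMatA P adj_a adj_b n)) (pvMatA P adj_a adj_b n) with hR
      rw [hg]
      calc ((List.range n).flatMap (fun i => (List.range n).map (fun j => (R[i]!)[j]!))).sum
          = ∑ i ∈ Finset.range n, ∑ j ∈ Finset.range n, (R[i]!)[j]! := by
            rw [pvSum_flatMap, pvSum_map_range]
            exact Finset.sum_congr rfl (fun i _ => pvSum_map_range _ n)
        _ = ∑ j ∈ Finset.range n, pvColSum n R j := by rw [Finset.sum_comm]; rfl
        _ = ∑ j ∈ Finset.range n, g j := by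
            refine Finset.sum_congr rfl (fun j hj => ?_)
            rw [hinv j (Finset.mem_range.mp hj), hg,
              pvGetElemBang_map_range g (Finset.mem_range.mp hj)]
        _ = ((List.range n).map g).sum := (pvSum_map_range g n).symm
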